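-- pv_equiv track=rewrite | github.com/adariumesh/WeaktoStrong | backend/app/core/ai/hint_generator.py | _prioritize_hints
-- ===== SOURCE A (Python) =====
-- from typing import Any
--
-- def _prioritize_hints(
--     hints: list[dict[str, Any]], analysis: dict[str, bool]
-- ) -> list[dict[str, Any]]:
--     """Prioritize hints based on situation analysis"""
--
--     # Sort by priority level
--     priority_order = {"high": 0, "medium": 1, "low": 2}
--     sorted_hints = sorted(hints, key=lambda h: priority_order.get(h["priority"], 3))
--
--     # Remove duplicates based on message content
--     unique_hints = []
--     seen_messages = set()
--
--     for hint in sorted_hints: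
--         message = hint["message"]
--         if message not in seen_messages:
--             unique_hints.append(hint)
--             seen_messages.add(message)
--
--     return unique_hints
-- ===== SOURCE B (Python) =====
-- def _prioritize_hints(hints, analysis):
--     """Staged filter passes per fixed priority level, then recursive dedup by message."""
--     def key(h):
--         p = h["priority"]
--         return 0 if p == "high" else 1 if p == "medium" else 2 if p == "low" else 3
--
--     arranged = [h for k in range(4) for h in hints if key(h) == k]
--
--     def dedup(lst):
--         if not lst:
--             return []
--         head = lst[0]
--         m = head["message"]
--         return [head] + dedup([h for h in lst[1:] if h["message"] != m])
--
--     return dedup(arranged)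
-- ===== Notes on version B (the rewrite author's own statement) =====
-- stated objective: alternative
-- what changed: Replaces the comparison sort by priority with staged filter passes over the four fixed priority levels (concatenated in order 0..3), and replaces the seen-set accumulator loop with a recursive dedup that filters the tail by the head's message.
import Mathlib
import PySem

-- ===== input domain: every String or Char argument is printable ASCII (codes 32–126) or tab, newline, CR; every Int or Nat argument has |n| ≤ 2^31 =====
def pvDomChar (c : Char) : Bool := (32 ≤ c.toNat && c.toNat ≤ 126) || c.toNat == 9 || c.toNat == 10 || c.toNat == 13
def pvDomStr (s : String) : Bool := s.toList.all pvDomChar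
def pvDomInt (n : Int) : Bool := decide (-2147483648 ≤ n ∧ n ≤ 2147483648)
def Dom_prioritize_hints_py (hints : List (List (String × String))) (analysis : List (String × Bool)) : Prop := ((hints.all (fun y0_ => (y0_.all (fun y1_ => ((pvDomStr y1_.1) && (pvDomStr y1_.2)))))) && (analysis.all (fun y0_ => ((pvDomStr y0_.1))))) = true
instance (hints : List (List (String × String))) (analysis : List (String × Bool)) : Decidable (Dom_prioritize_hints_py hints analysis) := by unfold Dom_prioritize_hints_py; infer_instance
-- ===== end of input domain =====

-- B replaces the comparison sort by priority with staged filter passes over the four fixed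
-- levels and the seen-set dedup loop with a recursive dedup filtering the tail; return values proved equal.


-- ===== PORT A =====
-- h["message"] — the same access in both sources; h["priority"]/h["message"] raise KeyError
-- when missing, Pre_ excludes that, so the '.getD ""' defaults are unreachable inside Pre_.
def pvMsg (h : List (String × String)) : String :=
  (PySem.Dict.get? (PySem.Dict.mk h) "message").getD ""

-- priority_order.get(h["priority"], 3)
def pvPrio (h : List (String × String)) : Int :=
  PySem.Dict.getD (PySem.Dict.mk [("high", (0 : Int)), ("medium", 1), ("low", 2)])
    ((PySem.Dict.get? (PySem.Dict.mk h) "priority").getD "") 3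

-- loop body of 'for hint in sorted_hints: message = hint["message"]; if message not in seen: append; add'
def pvDedupStep (st : List (List (String × String)) × PySem.Set String)
    (hint : List (String × String)) : List (List (String × String)) × PySem.Set String :=
  let message := pvMsg hint
  if ¬ (PySem.Set.contains st.2 message = true) then (st.1 ++ [hint], PySem.Set.add st.2 message)
  else st

def prioritize_hints_py (hints : List (List (String × String))) (analysis : List (String × Bool)) : List (List (String × String)) :=
  let sorted_hints := PySem.List.sorted hints pvPrio false
  (sorted_hints.foldl pvDedupStep ([], PySem.Set.empty)).1

-- ===== PORT B =====
-- 0 if p == "high" else 1 if p == "medium" else 2 if p == "low" else 3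
def pvKeyB (h : List (String × String)) : Int :=
  let p := (PySem.Dict.get? (PySem.Dict.mk h) "priority").getD ""
  if p == "high" then 0 else if p == "medium" then 1 else if p == "low" then 2 else 3

-- def dedup(lst): …  (recursion on the list; the comprehension filters the tail)
def pvDedupRec : List (List (String × String)) → List (List (String × String))
  | [] => []
  | head :: rest =>
      let m := pvMsg head
      [head] ++ pvDedupRec (rest.filter (fun h => ¬ (pvMsg h == m)))
termination_by l => l.length
decreasing_by simpa using (List.length_filter_le _ _).trans (by simp)

def prioritize_hints_py_alt (hints : List (List (String × String))) (analysis : List (String × Bool)) : List (List (String × String)) :=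
  -- arranged = [h for k in range(4) for h in hints if key(h) == k]
  let arranged := (PySem.List.pyRange 0 4 1).flatMap (fun k => hints.filter (fun h => pvKeyB h == k))
  pvDedupRec arranged

-- ===== PRECONDITION & SPEC =====
-- Pre_ excludes exactly the hint dicts missing a "priority" or "message" key, on which the
-- Python A raises KeyError (in the sort key resp. the dedup loop).
def Pre_prioritize_hints_py (hints : List (List (String × String))) (analysis : List (String × Bool)) : Prop :=
  -- the "priority" VALUE is unconstrained: "high", "medium", "low" or any other string is fine
  (hints.all (fun h => (PySem.Dict.get? (PySem.Dict.mk h) "message").isSome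
                    && (PySem.Dict.get? (PySem.Dict.mk h) "priority").isSome)) = true
instance (hints : List (List (String × String))) (analysis : List (String × Bool)) : Decidable (Pre_prioritize_hints_py hints analysis) := by unfold Pre_prioritize_hints_py; infer_instance

def pvWitness_prioritize_hints_py : (List (List (String × String))) × (List (String × Bool)) :=
  ([[("priority", "high"), ("message", "check loop bounds")], [("priority", "low"), ("message", "check loop bounds")], [("priority", "medium"), ("message", "add a base case")]], [])

def Spec_prioritize_hints_py (hints : List (List (String × String))) (analysis : List (String × Bool)) (out : List (List (String × String))) : Prop := out = prioritize_hints_py_alt hints analysis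
instance (hints : List (List (String × String))) (analysis : List (String × Bool)) (out : List (List (String × String))) : Decidable (Spec_prioritize_hints_py hints analysis out) := by unfold Spec_prioritize_hints_py; infer_instance

-- ===== CLAIM (what is proved, stated in full; the proofs are below) =====
def Claim_equal_prioritize_hints_py : Prop := ∀ (hints : List (List (String × String))) (analysis : List (String × Bool)), Dom_prioritize_hints_py hints analysis → Pre_prioritize_hints_py hints analysis → Spec_prioritize_hints_py hints analysis (prioritize_hints_py hints analysis)

-- ===== LEMMAS AND PROOFS =====

theorem pvKeyB_eq_pvPrio (h : List (String × String)) : pvKeyB h = pvPrio h := by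
  simp only [pvKeyB, pvPrio]
  generalize ((PySem.Dict.get? (PySem.Dict.mk h) "priority").getD "") = s
  by_cases h1 : s = "high"
  · subst h1; decide
  by_cases h2 : s = "medium"
  · subst h2; decide
  by_cases h3 : s = "low"
  · subst h3; decide
  have e1 : (("high" : String) == s) = false := beq_eq_false_iff_ne.mpr (fun e => h1 e.symm)
  have e2 : (("medium" : String) == s) = false := beq_eq_false_iff_ne.mpr (fun e => h2 e.symm)
  have e3 : (("low" : String) == s) = false := beq_eq_false_iff_ne.mpr (fun e => h3 e.symm)
  have f1 : ((s : String) == "high") = false := beq_eq_false_iff_ne.mpr h1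
  have f2 : ((s : String) == "medium") = false := beq_eq_false_iff_ne.mpr h2
  have f3 : ((s : String) == "low") = false := beq_eq_false_iff_ne.mpr h3
  simp [PySem.Dict.getD, PySem.Dict.get?, List.find?, e1, e2, e3, f1, f2, f3]

theorem pvPrio_cases (h : List (String × String)) :
    pvPrio h = 0 ∨ pvPrio h = 1 ∨ pvPrio h = 2 ∨ pvPrio h = 3 := by
  rw [← pvKeyB_eq_pvPrio]
  simp only [pvKeyB]
  split_ifs <;> simp

theorem insertBy_cons {α : Type} (before : α → α → Bool) (x a : α) (t : List α) :
    PySem.List.insertBy before x (a :: t) =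
      if before x a then x :: a :: t else a :: PySem.List.insertBy before x t := rfl

theorem insertBy_append_not_before {α : Type} (before : α → α → Bool) (x : α)
    (l1 l2 : List α) (h : ∀ y ∈ l1, before x y = false) :
    PySem.List.insertBy before x (l1 ++ l2) = l1 ++ PySem.List.insertBy before x l2 := by
  induction l1 with
  | nil => simp
  | cons a t ih =>
      rw [List.cons_append, insertBy_cons, h a (by simp), ih (fun y hy => h y (by simp [hy]))]
      simp

theorem insertBy_before_head {α : Type} (before : α → α → Bool) (x : α)
    (l : List α) (h : ∀ y ∈ l, before x y = true) :
    PySem.List.insertBy before x l = x :: l := by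
  cases l with
  | nil => rfl
  | cons a t => rw [insertBy_cons, h a (by simp)]; simp

-- the filter of hints with priority key i
def pvF (i : Int) (xs : List (List (String × String))) : List (List (String × String)) :=
  xs.filter (fun h => pvPrio h == i)

theorem pvF_append (i : Int) (xs : List (List (String × String))) (x : List (String × String)) :
    pvF i (xs ++ [x]) = pvF i xs ++ if pvPrio x = i then [x] else [] := by
  simp only [pvF, List.filter_append, List.filter_cons, List.filter_nil]
  split_ifs with h1 h2 h2 <;> simp_all

theorem mem_pvF_key {i : Int} {xs : List (List (String × String))} {y : List (String × String)}
    (hy : y ∈ pvF i xs) : pvPrio y = i := by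
  have := List.of_mem_filter hy
  simpa using this

-- the stable sort by the 4-valued key is the concatenation of the four filters
theorem sorted_eq_filters (xs : List (List (String × String))) :
    PySem.List.sorted xs pvPrio false = pvF 0 xs ++ pvF 1 xs ++ pvF 2 xs ++ pvF 3 xs := by
  induction xs using List.reverseRecOn with
  | nil => rfl
  | append_singleton t x ih =>
      have hfold : ∀ ys : List (List (String × String)),
          PySem.List.sorted ys pvPrio false =
            ys.foldl (fun acc z => PySem.List.insertBy (fun a b => decide (pvPrio a < pvPrio b)) z acc) [] := by
        intro ys; rfl
      rw [hfold, List.foldl_append, ← hfold, ih]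
      simp only [List.foldl_cons, List.foldl_nil, List.append_assoc]
      have skip : ∀ (i : Int), pvPrio x ≥ i → ∀ y ∈ pvF i t,
          (fun a b => decide (pvPrio a < pvPrio b)) x y = false := by
        intro i hi y hy
        simp only [decide_eq_false_iff_not, not_lt, mem_pvF_key hy]
        omega
      have ins : ∀ (i : Int), pvPrio x < i → ∀ y ∈ pvF i t,
          (fun a b => decide (pvPrio a < pvPrio b)) x y = true := by
        intro i hi y hy
        simp only [decide_eq_true_eq, mem_pvF_key hy]
        omega
      rcases pvPrio_cases x with hk | hk | hk | hk
      · rw [insertBy_append_not_before _ _ _ _ (skip 0 (by omega)),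
            insertBy_before_head _ _ _ (by
          intro y hy
          simp only [List.mem_append] at hy
          rcases hy with hy | hy | hy
          · exact ins 1 (by omega) y hy
          · exact ins 2 (by omega) y hy
          · exact ins 3 (by omega) y hy)]
        simp [pvF_append, hk, List.append_assoc]
      · rw [insertBy_append_not_before _ _ _ _ (skip 0 (by omega)),
            insertBy_append_not_before _ _ _ _ (skip 1 (by omega)),
            insertBy_before_head _ _ _ (by
          intro y hy
          simp only [List.mem_append] at hy
          rcases hy with hy | hy
          · exact ins 2 (by omega) y hy
          · exact ins 3 (by omega) y hy)]
        simp [pvF_append, hk, List.append_assoc]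
      · rw [insertBy_append_not_before _ _ _ _ (skip 0 (by omega)),
            insertBy_append_not_before _ _ _ _ (skip 1 (by omega)),
            insertBy_append_not_before _ _ _ _ (skip 2 (by omega)),
            insertBy_before_head _ _ _ (ins 3 (by omega))]
        simp [pvF_append, hk, List.append_assoc]
      · rw [insertBy_append_not_before _ _ _ _ (skip 0 (by omega)),
            insertBy_append_not_before _ _ _ _ (skip 1 (by omega)),
            insertBy_append_not_before _ _ _ _ (skip 2 (by omega)),
            PySem.List.insertBy_of_forall_not_before _ _ _ (skip 3 (by omega))]
        simp [pvF_append, hk]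

theorem contains_add_eq (s : PySem.Set String) (m x : String) :
    PySem.Set.contains (PySem.Set.add s m) x = (PySem.Set.contains s x || x == m) := by
  by_cases hm : m ∈ s
  · by_cases hx : x = m
    · subst hx; simp [PySem.Set.add, hm]
    · simp [PySem.Set.add, hm, beq_eq_false_iff_ne.mpr hx]
  · by_cases hx : x = m
    · subst hx; simp [PySem.Set.add, hm]
    · simp [PySem.Set.add, hm, beq_eq_false_iff_ne.mpr hx, hx]

-- A's seen-set fold equals B's recursive dedup of the not-yet-seen elements
theorem foldl_dedup_eq_aux (n : Nat) :
    ∀ (xs : List (List (String × String))), xs.length ≤ n →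
    ∀ (acc : List (List (String × String))) (s : PySem.Set String),
      (xs.foldl pvDedupStep (acc, s)).1
        = acc ++ pvDedupRec (xs.filter (fun h => ¬ PySem.Set.contains s (pvMsg h))) := by
  induction n with
  | zero =>
      intro xs hlen acc s
      rw [List.length_eq_zero_iff.mp (Nat.le_zero.mp hlen)]
      simp [pvDedupRec]
  | succ n ih =>
    intro xs hlen acc s
    cases xs with
    | nil => simp [pvDedupRec]
    | cons x t =>
      have hlt : t.length ≤ n := by simpa using hlen
      by_cases hx : PySem.Set.contains s (pvMsg x) = true
      · have hx' : pvMsg x ∈ s := by simpa using hx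
        have : pvDedupStep (acc, s) x = (acc, s) := by simp [pvDedupStep, hx']
        rw [List.foldl_cons, this, ih t hlt]
        simp [List.filter_cons, hx']
      · have hx' : ¬ pvMsg x ∈ s := by simpa using hx
        have : pvDedupStep (acc, s) x = (acc ++ [x], PySem.Set.add s (pvMsg x)) := by
          simp [pvDedupStep, hx']
        rw [List.foldl_cons, this, ih t hlt]
        have hfilt : t.filter (fun h => ¬ PySem.Set.contains (PySem.Set.add s (pvMsg x)) (pvMsg h))
            = (t.filter (fun h => ¬ PySem.Set.contains s (pvMsg h))).filter
                (fun h => ¬ (pvMsg h == pvMsg x)) := by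
          rw [List.filter_filter]
          apply List.filter_congr
          intro a _
          rw [contains_add_eq]
          cases hc : PySem.Set.contains s (pvMsg a) <;> cases hb : (pvMsg a == pvMsg x) <;> simp
        rw [hfilt]
        simp [pvDedupRec, List.filter_cons, hx', List.filter_filter, Bool.and_comm]

theorem foldl_dedup_eq (xs : List (List (String × String)))
    (acc : List (List (String × String))) (s : PySem.Set String) :
    (xs.foldl pvDedupStep (acc, s)).1
      = acc ++ pvDedupRec (xs.filter (fun h => ¬ PySem.Set.contains s (pvMsg h))) :=
  foldl_dedup_eq_aux xs.length xs le_rfl acc s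

-- ===== VERDICT (by name: the statement is the Claim_ definition above) =====
theorem prioritize_hints_py_spec : Claim_equal_prioritize_hints_py := by
  intro hints analysis _ _
  unfold Spec_prioritize_hints_py prioritize_hints_py prioritize_hints_py_alt
  rw [foldl_dedup_eq, sorted_eq_filters]
  have hr : PySem.List.pyRange 0 4 1 = [0, 1, 2, 3] := by decide
  have hk : ∀ (i : Int), hints.filter (fun h => pvKeyB h == i) = pvF i hints := by
    intro i
    apply List.filter_congr
    intro a _
    rw [pvKeyB_eq_pvPrio]
  have hseen : ∀ ys : List (List (String × String)),
      ys.filter (fun h => ¬ PySem.Set.contains PySem.Set.empty (pvMsg h)) = ys := by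
    intro ys
    apply List.filter_eq_self.mpr
    intro a _
    simp [PySem.Set.empty, PySem.Set.contains]
  rw [hseen]
  simp [hr, hk, List.append_assoc]
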